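-- pv_equiv track=rewrite | github.com/akshit113/HackerRank-Practice-Problems | funny strings.py | funnyString
-- ===== SOURCE A (Python) =====
-- def funnyString(s):
--     rev = s[::-1]
--     n = len(s)
--     i = 0
--     straight = []
--     reversed = []
--     while i <= n - 2:
--         curr, next = ord(s[i]), ord(s[i + 1])
--         rev_curr, rev_next = ord(rev[i]), ord(rev[i + 1])
--         straight.append(abs(curr - next))
--         reversed.append(abs(rev_curr - rev_next))
--         i += 1
--     if straight == reversed:
--         ans = 'Funny'
--     else:
--         ans = 'Not Funny'
--     return ans
-- ===== SOURCE B (Python) =====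
-- def funnyString(s):
--     # Build the adjacent-difference list once, then palindrome-check it
--     # in place with two pointers (early exit on first mismatch).
--     d = [abs(ord(a) - ord(b)) for a, b in zip(s, s[1:])]
--     lo, hi = 0, len(d) - 1
--     while lo < hi:
--         if d[lo] != d[hi]:
--             return 'Not Funny'
--         lo += 1
--         hi -= 1
--     return 'Funny'
-- ===== Notes on version B (the rewrite author's own statement) =====
-- stated objective: simpler
-- what changed: B builds only one adjacent-difference list (A builds two, one for the string and one for its reversal) and checks it is a palindrome with two inward-moving pointers that stop at the first mismatch, instead of A's whole-list equality of the two lists.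
import Mathlib
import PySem

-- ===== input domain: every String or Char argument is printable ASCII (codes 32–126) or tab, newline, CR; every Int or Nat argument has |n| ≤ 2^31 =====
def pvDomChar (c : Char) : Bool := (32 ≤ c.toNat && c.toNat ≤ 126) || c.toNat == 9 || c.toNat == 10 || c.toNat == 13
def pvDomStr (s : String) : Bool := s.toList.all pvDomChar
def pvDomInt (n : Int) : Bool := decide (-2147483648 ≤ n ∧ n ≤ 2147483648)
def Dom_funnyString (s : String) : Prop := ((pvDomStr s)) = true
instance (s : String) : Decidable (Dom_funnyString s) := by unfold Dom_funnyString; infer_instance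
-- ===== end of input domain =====

-- B builds one adjacent-difference list and palindrome-checks it with two inward pointers,
-- instead of A's two difference lists (string and reversed string) compared wholesale.

-- ===== PORT A =====
-- A's while loop: while i <= n-2, append |ord s[i] - ord s[i+1]| to straight and the same
-- for rev to reversed.  (indexing via getD: always in range here since i+2 ≤ n — exact)
def funnyLoop (cs rv : List Char) (n i : Nat) (st rd : List Int) : List Int × List Int :=
  if i + 2 ≤ n then
    funnyLoop cs rv n (i + 1)
      (st ++ [|((cs.getD i ' ').toNat : Int) - ((cs.getD (i + 1) ' ').toNat : Int)|])
      (rd ++ [|((rv.getD i ' ').toNat : Int) - ((rv.getD (i + 1) ' ').toNat : Int)|])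
  else (st, rd)
termination_by n - i

def funnyString (s : String) : String :=
  let cs := s.toList
  let rev := cs.reverse
  let n := cs.length
  let p := funnyLoop cs rev n 0 [] []
  if p.1 == p.2 then "Funny" else "Not Funny"

-- ===== PORT B =====
-- B's while loop: two pointers, early exit on first mismatch.
def twoPtr (d : List Int) (lo hi : Nat) : Bool :=
  if lo < hi then
    if d.getD lo 0 != d.getD hi 0 then false
    else twoPtr d (lo + 1) (hi - 1)
  else true
termination_by hi - lo

def funnyString_alt (s : String) : String :=
  let cs := s.toList
  let d := (cs.zip (cs.drop 1)).map (fun p => |(p.1.toNat : Int) - (p.2.toNat : Int)|)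
  if twoPtr d 0 (d.length - 1) then "Funny" else "Not Funny"

-- ===== PRECONDITION & SPEC =====
def Spec_funnyString (s : String) (out : String) : Prop := out = funnyString_alt s
instance (s : String) (out : String) : Decidable (Spec_funnyString s out) := by unfold Spec_funnyString; infer_instance

-- ===== CLAIM (what is proved, stated in full; the proofs are below) =====
def Claim_equal_funnyString : Prop := ∀ (s : String), Dom_funnyString s → Spec_funnyString s (funnyString s)

-- ===== LEMMAS AND PROOFS =====

-- the adjacent-difference function, symmetric
def pvF (a b : Char) : Int := |(a.toNat : Int) - (b.toNat : Int)|

theorem pvF_comm (a b : Char) : pvF a b = pvF b a := by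
  simp [pvF, abs_sub_comm]

-- the sequence of differences appended by A's loop from index i on
def diffsFrom (cs : List Char) (n i : Nat) : List Int :=
  if i + 2 ≤ n then pvF (cs.getD i ' ') (cs.getD (i + 1) ' ') :: diffsFrom cs n (i + 1) else []
termination_by n - i

theorem diffsFrom_cons (cs : List Char) (n i : Nat) (h : i + 2 ≤ n) :
    diffsFrom cs n i = pvF (cs.getD i ' ') (cs.getD (i + 1) ' ') :: diffsFrom cs n (i + 1) := by
  conv_lhs => rw [diffsFrom]
  rw [if_pos h]

theorem diffsFrom_nil (cs : List Char) (n i : Nat) (h : ¬ i + 2 ≤ n) :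
    diffsFrom cs n i = [] := by
  rw [diffsFrom, if_neg h]

theorem funnyLoop_spec (cs rv : List Char) (n : Nat) :
    ∀ i st rd, funnyLoop cs rv n i st rd = (st ++ diffsFrom cs n i, rd ++ diffsFrom rv n i) := by
  intro i st rd
  fun_induction funnyLoop with
  | case1 i st rd h ih =>
      rw [ih, diffsFrom_cons cs n i h, diffsFrom_cons rv n i h]
      simp [pvF]
  | case2 i st rd h =>
      rw [diffsFrom_nil cs n i h, diffsFrom_nil rv n i h]
      simp

theorem diffsFrom_eq (cs : List Char) (i : Nat) :
    diffsFrom cs cs.length i = List.zipWith pvF (cs.drop i) (cs.drop (i + 1)) := by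
  fun_induction diffsFrom cs cs.length i with
  | case1 i h ih =>
      rw [ih]
      conv_rhs => rw [List.drop_eq_getElem_cons (show i < cs.length by omega)]
      rw [List.drop_eq_getElem_cons (show i + 1 < cs.length by omega)]
      rw [List.zipWith_cons_cons]
      rw [List.getD_eq_getElem cs ' ' (show i < cs.length by omega),
        List.getD_eq_getElem cs ' ' (show i + 1 < cs.length by omega)]
  | case2 i h =>
      rw [List.drop_eq_nil_of_le (show cs.length ≤ i + 1 by omega), List.zipWith_nil_right]

-- normalised form: differences as a zipWith over dropLast/tail (equal-length lists)
theorem diffs_norm (cs : List Char) :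
    List.zipWith pvF cs cs.tail = List.zipWith pvF cs.dropLast cs.tail := by
  induction cs with
  | nil => rfl
  | cons a t ih =>
      cases t with
      | nil => rfl
      | cons b u =>
          simp only [List.tail_cons] at ih ⊢
          rw [List.dropLast_cons₂, List.zipWith_cons_cons, List.zipWith_cons_cons, ih]

theorem diffs_reverse (cs : List Char) :
    List.zipWith pvF cs.reverse cs.reverse.tail = (List.zipWith pvF cs cs.tail).reverse := by
  rw [diffs_norm, diffs_norm, List.tail_reverse, List.dropLast_reverse,
    List.reverse_zipWith (by simp [List.length_dropLast, List.length_tail])]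
  exact List.zipWith_comm_of_comm pvF_comm

theorem twoPtr_iff (d : List Int) (lo hi : Nat) :
    twoPtr d lo hi = true ↔ ∀ i, lo ≤ i → i ≤ hi → d.getD i 0 = d.getD (lo + hi - i) 0 := by
  fun_induction twoPtr with
  | case1 lo hi hlt hne =>
      simp only [Bool.false_eq_true, false_iff]
      intro hC
      have h2 := hC lo (Nat.le_refl _) (by omega)
      rw [Nat.add_sub_cancel_left] at h2
      simp at hne
      exact hne (by simpa using h2)
  | case2 lo hi hlt hne ih =>
      have heq : d.getD lo 0 = d.getD hi 0 := by simpa using hne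
      rw [ih]
      constructor
      · intro hC i h1 h2
        rcases Nat.lt_or_ge i (lo + 1) with h | h
        · have : i = lo := by omega
          subst this
          rwa [Nat.add_sub_cancel_left]
        · rcases Nat.lt_or_ge (hi - 1) i with h' | h'
          · have : i = hi := by omega
            subst this
            rw [Nat.add_sub_cancel, heq]
          · have := hC i h h'
            rwa [show lo + 1 + (hi - 1) - i = lo + hi - i by omega] at this
      · intro hC i h1 h2
        have := hC i (by omega) (by omega)
        rwa [show lo + hi - i = lo + 1 + (hi - 1) - i by omega] at this
  | case3 lo hi hlt =>
      simp only [true_iff]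
      intro i h1 h2
      have hi' : i = lo ∧ lo = hi := by omega
      rw [hi'.1, hi'.2, Nat.add_sub_cancel]

theorem pal_iff (d : List Int) :
    (d = d.reverse) ↔ ∀ i, 0 ≤ i → i ≤ d.length - 1 → d.getD i 0 = d.getD (0 + (d.length - 1) - i) 0 := by
  constructor
  · intro h i _ hi
    cases Nat.eq_zero_or_pos d.length with
    | inl h0 =>
        have hnil : d = [] := List.eq_nil_of_length_eq_zero h0
        simp [hnil]
    | inr h0 =>
        have hi' : i < d.length := by omega
        have hj' : 0 + (d.length - 1) - i < d.length := by omega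
        rw [List.getD_eq_getElem d 0 hi', List.getD_eq_getElem d 0 hj']
        have hgi := List.getElem_of_eq h hi'
        rw [List.getElem_reverse] at hgi
        rw [hgi]
        congr 1
        omega
  · intro hC
    refine List.ext_getElem (by simp) ?_
    intro i h1 h2
    rw [List.getElem_reverse]
    have := hC i (Nat.zero_le _) (by omega)
    rw [List.getD_eq_getElem d 0 h1, List.getD_eq_getElem d 0 (by omega)] at this
    rw [this]
    congr 1
    omega

-- ===== VERDICT (by name: the statement is the Claim_ definition above) =====
theorem funnyString_spec : Claim_equal_funnyString := by
  intro s _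
  unfold Spec_funnyString
  simp only [funnyString, funnyString_alt, funnyLoop_spec, List.nil_append]
  set cs := s.toList with hcs
  have hrevlen : cs.reverse.length = cs.length := by simp
  have hA : diffsFrom cs cs.length 0 = List.zipWith pvF cs cs.tail := by
    rw [diffsFrom_eq]
    simp [List.drop_one]
  have hArev : diffsFrom cs.reverse cs.length 0 = (List.zipWith pvF cs cs.tail).reverse := by
    rw [← hrevlen, diffsFrom_eq]
    simpa only [List.drop_zero, Nat.zero_add, List.drop_one] using diffs_reverse cs
  have hd : (cs.zip (cs.drop 1)).map (fun p => |(p.1.toNat : Int) - (p.2.toNat : Int)|)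
      = List.zipWith pvF cs cs.tail := by
    rw [List.map_zip_eq_zipWith, List.drop_one]
    rfl
  rw [hA, hArev, hd]
  have hiff : ((List.zipWith pvF cs cs.tail) == (List.zipWith pvF cs cs.tail).reverse)
      = twoPtr (List.zipWith pvF cs cs.tail) 0 ((List.zipWith pvF cs cs.tail).length - 1) := by
    set D := List.zipWith pvF cs cs.tail with hD
    rcases h : twoPtr D 0 (D.length - 1) with _ | _
    · rw [beq_eq_false_iff_ne]
      intro hEq
      rw [← Bool.not_eq_true] at h
      exact h ((twoPtr_iff D 0 (D.length - 1)).mpr ((pal_iff D).mp hEq))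
    · rw [beq_iff_eq]
      exact (pal_iff D).mpr ((twoPtr_iff D 0 (D.length - 1)).mp h)
  rw [hiff]
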